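-- pv_equiv track=rewrite | github.com/hitromudr/abc | bench/executors.py | _find_lines_in_file
-- ===== SOURCE A (Python) =====
-- def _find_lines_in_file(file_lines: list[str], target_lines: list[str]) -> int | None:
--     """Ищет блок target_lines в file_lines по stripped содержимому."""
--     if not target_lines:
--         return None
--
--     target_stripped = [l.rstrip() for l in target_lines]
--     first = target_stripped[0]
--     n = len(target_stripped)
--
--     for i in range(len(file_lines) - n + 1):
--         if file_lines[i].rstrip() == first:
--             if all(file_lines[i + j].rstrip() == target_stripped[j] for j in range(n)):
--                 return i
--     return None
-- ===== SOURCE B (Python) =====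
-- def _find_lines_in_file(file_lines: list[str], target_lines: list[str]) -> int | None:
--     """Strip everything once, then scan suffixes with a single prefix comparison."""
--     if not target_lines:
--         return None
--     target = [l.rstrip() for l in target_lines]
--     rest = [l.rstrip() for l in file_lines]
--     i = 0
--     while len(rest) >= len(target):
--         if rest[:len(target)] == target:
--             return i
--         rest = rest[1:]
--         i += 1
--     return None
-- ===== Notes on version B (the rewrite author's own statement) =====
-- stated objective: alternative
-- what changed: B strips both lists exactly once up front, then walks the suffixes of the stripped file comparing a whole prefix block, instead of A's index loop that re-strips file lines inside a nested first-line check plus an all() over range(n).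
import Mathlib
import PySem

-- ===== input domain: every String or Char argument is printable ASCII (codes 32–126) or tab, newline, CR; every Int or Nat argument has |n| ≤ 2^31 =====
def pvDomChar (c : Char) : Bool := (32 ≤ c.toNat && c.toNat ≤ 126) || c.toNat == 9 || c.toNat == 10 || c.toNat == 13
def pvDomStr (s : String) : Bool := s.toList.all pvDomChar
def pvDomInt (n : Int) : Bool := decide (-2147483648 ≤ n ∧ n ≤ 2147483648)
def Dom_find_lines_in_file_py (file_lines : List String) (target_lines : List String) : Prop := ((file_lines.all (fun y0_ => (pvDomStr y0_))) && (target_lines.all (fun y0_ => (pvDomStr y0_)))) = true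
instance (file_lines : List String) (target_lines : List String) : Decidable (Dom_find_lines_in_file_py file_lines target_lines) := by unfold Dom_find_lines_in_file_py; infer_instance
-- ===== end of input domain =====

-- B strips both lists exactly once and scans suffixes of the stripped file with a whole-prefix
-- comparison, instead of A's index loop that re-strips file lines inside a nested check; same cost class.

-- ===== PORT A =====
def find_lines_in_file_py_go (file_lines : List String) (target_stripped : List String)
    (first : String) (n : Int) : List Int → Option Int
  | [] => none
  | i :: rest =>
    if PySem.Str.rstrip (PySem.List.pyGetD file_lines i "") = first then
      if (PySem.List.pyRange 0 n 1).all (fun j =>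
           PySem.Str.rstrip (PySem.List.pyGetD file_lines (i + j) "") == PySem.List.pyGetD target_stripped j "")
      then some i
      else find_lines_in_file_py_go file_lines target_stripped first n rest
    else find_lines_in_file_py_go file_lines target_stripped first n rest

def find_lines_in_file_py (file_lines : List String) (target_lines : List String) : Option Int :=
  if target_lines.length = 0 then none
  else
    let target_stripped := target_lines.map (fun l => PySem.Str.rstrip l)
    let first := PySem.List.pyGetD target_stripped 0 ""
    let n : Int := target_stripped.length
    find_lines_in_file_py_go file_lines target_stripped first n
      (PySem.List.pyRange 0 ((file_lines.length : Int) - n + 1) 1)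

-- ===== PORT B =====
def find_lines_in_file_py_alt_go (target : List String) : List String → Int → Option Int
  | rest, i =>
    if rest.length < target.length then none
    else if rest.take target.length = target then some i
    else
      match rest with
      | [] => none
      | _ :: rs => find_lines_in_file_py_alt_go target rs (i + 1)

def find_lines_in_file_py_alt (file_lines : List String) (target_lines : List String) : Option Int :=
  if target_lines.isEmpty then none
  else
    find_lines_in_file_py_alt_go (target_lines.map (fun l => PySem.Str.rstrip l))
      (file_lines.map (fun l => PySem.Str.rstrip l)) 0

-- ===== PRECONDITION & SPEC =====
def Spec_find_lines_in_file_py (file_lines : List String) (target_lines : List String) (out : Option Int) : Prop := out = find_lines_in_file_py_alt file_lines target_lines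
instance (file_lines : List String) (target_lines : List String) (out : Option Int) : Decidable (Spec_find_lines_in_file_py file_lines target_lines out) := by unfold Spec_find_lines_in_file_py; infer_instance

-- ===== CLAIM (what is proved, stated in full; the proofs are below) =====
def Claim_equal_find_lines_in_file_py : Prop := ∀ (file_lines : List String) (target_lines : List String), Dom_find_lines_in_file_py file_lines target_lines → Spec_find_lines_in_file_py file_lines target_lines (find_lines_in_file_py file_lines target_lines)

-- ===== LEMMAS AND PROOFS =====

-- A's inner all() over range(n) agrees with B's prefix comparison at offset k.
theorem pv_cond_iff (f t : List String) (k : Nat)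
    (hk : k + t.length ≤ f.length) :
    ((PySem.List.pyRange 0 (t.length : Int) 1).all (fun j =>
      PySem.Str.rstrip (PySem.List.pyGetD f ((k : Int) + j) "") == PySem.List.pyGetD t j "")) = true
    ↔ ((f.map (fun l => PySem.Str.rstrip l)).drop k).take t.length = t := by
  rw [PySem.List.pyRange_one, List.all_eq_true]
  simp only [List.mem_map, List.mem_range, Int.sub_zero, Int.toNat_natCast, beq_iff_eq,
    forall_exists_index, and_imp, forall_apply_eq_imp_iff₂, zero_add]
  have hcond : ∀ (jn : Nat) (hjn : jn < t.length),
      (PySem.Str.rstrip (PySem.List.pyGetD f ((k : Int) + (jn : Int)) "") = PySem.List.pyGetD t (jn : Int) ""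
        ↔ PySem.Str.rstrip (f[k + jn]'(by omega)) = t[jn]) := by
    intro jn hjn
    have h1 : (k : Int) + (jn : Int) = ((k + jn : Nat) : Int) := by push_cast; ring
    rw [h1, PySem.List.pyGetD_natCast, PySem.List.pyGetD_natCast,
        List.getD_eq_getElem _ _ (by omega), List.getD_eq_getElem _ _ hjn]
  constructor
  · intro h
    apply List.ext_getElem
    · simp; omega
    · intro jn h1 h2
      have hjn : jn < t.length := h2
      have := (hcond jn hjn).mp (h jn hjn)
      simpa [List.getElem_take, List.getElem_drop, List.getElem_map] using this
  · intro h jn hjn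
    apply (hcond jn hjn).mpr
    have : (((f.map (fun l => PySem.Str.rstrip l)).drop k).take t.length)[jn]'(by simp; omega) = t[jn]'hjn := by
      simp [h]
    simpa [List.getElem_take, List.getElem_drop, List.getElem_map] using this

-- if the all() condition holds then A's outer first-line check holds (the j = 0 instance).
theorem pv_first_of_all (f t : List String) (ht : t ≠ []) (k : Nat)
    (hC : ((PySem.List.pyRange 0 (t.length : Int) 1).all (fun j =>
      PySem.Str.rstrip (PySem.List.pyGetD f ((k : Int) + j) "") == PySem.List.pyGetD t j "")) = true) :
    PySem.Str.rstrip (PySem.List.pyGetD f (k : Int) "") = PySem.List.pyGetD t 0 "" := by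
  rw [List.all_eq_true] at hC
  have h0 : (0 : Int) ∈ PySem.List.pyRange 0 (t.length : Int) 1 := by
    rw [PySem.List.mem_pyRange_one]
    constructor
    · omega
    · have : 0 < t.length := List.length_pos_iff.mpr ht
      omega
  have := hC 0 h0
  simpa using this

-- one-step unfolding of B's while loop, and its three outcomes.
theorem alt_go_eq (t rest : List String) (i : Int) : find_lines_in_file_py_alt_go t rest i =
    if rest.length < t.length then none
    else if rest.take t.length = t then some i
    else match rest with
      | [] => none
      | _ :: rs => find_lines_in_file_py_alt_go t rs (i + 1) := by
  rw [find_lines_in_file_py_alt_go.eq_def]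

theorem alt_go_none (t rest : List String) (i : Int) (h : rest.length < t.length) :
    find_lines_in_file_py_alt_go t rest i = none := by
  rw [alt_go_eq, if_pos h]

theorem alt_go_found (t rest : List String) (i : Int) (h1 : ¬ rest.length < t.length)
    (h2 : rest.take t.length = t) : find_lines_in_file_py_alt_go t rest i = some i := by
  rw [alt_go_eq, if_neg h1, if_pos h2]

theorem alt_go_rec (t : List String) (x : String) (xs : List String) (i : Int)
    (h1 : ¬ (x :: xs).length < t.length) (h2 : (x :: xs).take t.length ≠ t) :
    find_lines_in_file_py_alt_go t (x :: xs) i = find_lines_in_file_py_alt_go t xs (i + 1) := by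
  rw [alt_go_eq, if_neg h1, if_neg h2]

-- the two loops agree from every starting offset k.
theorem pv_main (f t : List String) (ht : t ≠ []) :
    ∀ m k : Nat, f.length - k ≤ m →
    find_lines_in_file_py_go f t (PySem.List.pyGetD t 0 "") (t.length : Int)
        (PySem.List.pyRange (k : Int) ((f.length : Int) - (t.length : Int) + 1) 1)
      = find_lines_in_file_py_alt_go t ((f.map (fun l => PySem.Str.rstrip l)).drop k) (k : Int) := by
  have hn : 0 < t.length := List.length_pos_iff.mpr ht
  intro m
  induction m with
  | zero =>
    intro k hk
    rw [PySem.List.pyRange_one_eq_nil (by omega)]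
    rw [find_lines_in_file_py_go, alt_go_none _ _ _ (by simp; omega)]
  | succ m ih =>
    intro k hk
    by_cases hkn : k + t.length ≤ f.length
    · rw [PySem.List.pyRange_one_cons (by omega)]
      rw [find_lines_in_file_py_go]
      have hlen : ¬ ((f.map (fun l => PySem.Str.rstrip l)).drop k).length < t.length := by
        simp; omega
      by_cases hC : ((PySem.List.pyRange 0 (t.length : Int) 1).all (fun j =>
          PySem.Str.rstrip (PySem.List.pyGetD f ((k : Int) + j) "") == PySem.List.pyGetD t j "")) = true
      · rw [if_pos (pv_first_of_all f t ht k hC), if_pos hC,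
          alt_go_found _ _ _ hlen ((pv_cond_iff f t k hkn).mp hC)]
      · have htake : ((f.map (fun l => PySem.Str.rstrip l)).drop k).take t.length ≠ t :=
          fun h => hC ((pv_cond_iff f t k hkn).mpr h)
        have hdrop : (f.map (fun l => PySem.Str.rstrip l)).drop k
            = (f.map (fun l => PySem.Str.rstrip l))[k]'(by simp; omega)
              :: (f.map (fun l => PySem.Str.rstrip l)).drop (k + 1) :=
          List.drop_eq_getElem_cons (by simp; omega)
        have hrec := ih (k + 1) (by omega)
        push_cast at hrec
        rw [hdrop] at hlen htake
        rw [hdrop, alt_go_rec _ _ _ _ hlen htake, ← hrec]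
        split <;> rfl
    · rw [PySem.List.pyRange_one_eq_nil (by omega)]
      rw [find_lines_in_file_py_go, alt_go_none _ _ _ (by simp; omega)]

-- ===== VERDICT (by name: the statement is the Claim_ definition above) =====
theorem find_lines_in_file_py_spec : Claim_equal_find_lines_in_file_py := by
  intro f tl _
  unfold Spec_find_lines_in_file_py find_lines_in_file_py find_lines_in_file_py_alt
  cases tl with
  | nil => simp
  | cons h hs =>
    simp only [List.length_cons, List.isEmpty_cons]
    have ht : (h :: hs).map (fun l => PySem.Str.rstrip l) ≠ [] := by simp
    have := pv_main f ((h :: hs).map (fun l => PySem.Str.rstrip l)) ht f.length 0 (by omega)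
    simp only [Nat.cast_zero, List.drop_zero] at this
    simp only [List.length_map, List.length_cons] at this ⊢
    split
    · omega
    · exact this
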